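-- pv_equiv track=rewrite | github.com/edgarstansfield/Algo2Sem | Lab 4/eigth.py | k_mismatch_search
-- ===== SOURCE A (Python) =====
-- def k_mismatch_search(p, t, k):
--     matches = []
--
--     for i in range(len(t) - len(p) + 1):
--         mismatches = 0
--         for j in range(len(p)):
--             if t[i + j] != p[j]:
--                 mismatches += 1
--                 if mismatches > k:
--                     break
--         if mismatches <= k:
--             matches.append(i)
--     ans = f'{len(matches)} {" ".join(map(str, matches))}\n'
--     return ans
-- ===== SOURCE B (Python) =====
-- def k_mismatch_search(p, t, k):
--     # Column-major: one pass per pattern position, accumulating per-window mismatch counts.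
--     width = len(t) - len(p) + 1
--     counts = [0] * max(width, 0)
--     for j in range(len(p)):
--         pc = p[j]
--         for i in range(len(counts)):
--             if t[i + j] != pc:
--                 counts[i] += 1
--     matches = [i for i in range(len(counts)) if counts[i] <= k]
--     return f'{len(matches)} {" ".join(map(str, matches))}\n'
-- ===== Notes on version B (the rewrite author's own statement) =====
-- stated objective: alternative
-- what changed: Replaced the row-major nested scan with early break and per-window mismatch counter by a column-major sweep: one pass per pattern position accumulating mismatch counts for all windows in an array, then a filter over the counts.
import Mathlib
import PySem

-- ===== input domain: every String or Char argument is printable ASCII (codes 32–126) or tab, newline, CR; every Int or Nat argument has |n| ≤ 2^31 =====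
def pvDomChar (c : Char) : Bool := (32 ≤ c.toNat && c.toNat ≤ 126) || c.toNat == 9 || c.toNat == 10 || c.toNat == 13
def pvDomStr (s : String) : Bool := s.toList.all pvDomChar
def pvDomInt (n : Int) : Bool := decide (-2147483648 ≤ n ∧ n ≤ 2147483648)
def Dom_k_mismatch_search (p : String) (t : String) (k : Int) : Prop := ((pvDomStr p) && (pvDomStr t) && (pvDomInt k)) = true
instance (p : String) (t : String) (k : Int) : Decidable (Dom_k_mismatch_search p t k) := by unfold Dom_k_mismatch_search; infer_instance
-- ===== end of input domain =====

-- B replaces A's row-major scan with early break by a column-major sweep accumulating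
-- per-window mismatch counts (alternative traversal order, same asymptotic cost).


-- ===== PORT A =====
-- inner 'for j in range(len(p))' loop with its early 'break' once mismatches > k
def kmsInnerA (tl pl : List Char) (i k : Int) : List Int → Int → Int
  | [], m => m
  | j :: js, m =>
    if PySem.List.pyGet? tl (i + j) ≠ PySem.List.pyGet? pl j then
      (if m + 1 > k then m + 1 else kmsInnerA tl pl i k js (m + 1))
    else kmsInnerA tl pl i k js m

def k_mismatch_search (p : String) (t : String) (k : Int) : String :=
  let pl := p.toList
  let tl := t.toList
  let ms := (PySem.List.pyRange 0 ((tl.length : Int) - (pl.length : Int) + 1) 1).foldl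
    (fun acc i =>
      if kmsInnerA tl pl i k (PySem.List.pyRange 0 (pl.length : Int) 1) 0 ≤ k then acc ++ [i]
      else acc) []
  PySem.Int.toStr (ms.length : Int) ++ " " ++
    PySem.Str.join " " (ms.map PySem.Int.toStr) ++ "\n"

-- ===== PORT B =====
-- 'for i in range(len(counts)): counts[i] += …' transcribed as an index-aware map
-- (exact: iteration i reads and writes only counts[i]); pl[j] via pyGetD (j is always in range)
def kmsColStep (tl : List Char) (j : Int) (pc : Char) (counts : List Int) : List Int :=
  counts.mapIdx (fun i c => if PySem.List.pyGet? tl ((i : Int) + j) ≠ some pc then c + 1 else c)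

-- counts = [0]*max(width,0) then the 'for j' sweep
def kmsCounts (pl tl : List Char) : List Int :=
  (PySem.List.pyRange 0 (pl.length : Int) 1).foldl
    (fun cs j => kmsColStep tl j (PySem.List.pyGetD pl j ' ') cs)
    (List.replicate (max ((tl.length : Int) - (pl.length : Int) + 1) 0).toNat 0)

def k_mismatch_search_alt (p : String) (t : String) (k : Int) : String :=
  let pl := p.toList
  let tl := t.toList
  let counts := kmsCounts pl tl
  let ms := (PySem.List.pyRange 0 (counts.length : Int) 1).filter
    (fun i => decide (PySem.List.pyGetD counts i 0 ≤ k))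
  PySem.Int.toStr (ms.length : Int) ++ " " ++
    PySem.Str.join " " (ms.map PySem.Int.toStr) ++ "\n"

-- ===== PRECONDITION & SPEC =====
def Spec_k_mismatch_search (p : String) (t : String) (k : Int) (out : String) : Prop := out = k_mismatch_search_alt p t k
instance (p : String) (t : String) (k : Int) (out : String) : Decidable (Spec_k_mismatch_search p t k out) := by unfold Spec_k_mismatch_search; infer_instance

-- ===== CLAIM (what is proved, stated in full; the proofs are below) =====
def Claim_equal_k_mismatch_search : Prop := ∀ (p : String) (t : String) (k : Int), Dom_k_mismatch_search p t k → Spec_k_mismatch_search p t k (k_mismatch_search p t k)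

-- ===== LEMMAS AND PROOFS =====

-- A's inner loop passes the '≤ k' test iff the full mismatch count does
theorem kmsInnerA_le_iff (tl pl : List Char) (i k : Int) :
    ∀ (js : List Int) (m : Int),
      (kmsInnerA tl pl i k js m ≤ k ↔
        m + ((js.filter (fun j =>
          decide (PySem.List.pyGet? tl (i + j) ≠ PySem.List.pyGet? pl j))).length : Int) ≤ k) := by
  intro js
  induction js with
  | nil => intro m; simp [kmsInnerA]
  | cons j js ih =>
    intro m
    by_cases h : PySem.List.pyGet? tl (i + j) ≠ PySem.List.pyGet? pl j
    · rw [List.filter_cons, if_pos (by simpa using h)]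
      simp only [kmsInnerA, if_pos h, List.length_cons]
      by_cases hk : m + 1 > k
      · rw [if_pos hk]
        have hnn : (0 : Int) ≤ ((js.filter (fun j =>
            decide (PySem.List.pyGet? tl (i + j) ≠ PySem.List.pyGet? pl j))).length : Int) :=
          Int.natCast_nonneg _
        push_cast
        constructor <;> intro <;> omega
      · rw [if_neg hk, ih (m + 1)]
        push_cast
        constructor <;> intro <;> omega
    · rw [List.filter_cons, if_neg (by simpa using h)]
      simp only [kmsInnerA, if_neg h]
      exact ih m

-- B's column-major fold: length is preserved and entry i accumulates the mismatches of window i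
theorem kmsCol_length (tl pl : List Char) :
    ∀ (js : List Int) (cs : List Int),
      (js.foldl (fun cs j => kmsColStep tl j (PySem.List.pyGetD pl j ' ') cs) cs).length
        = cs.length := by
  intro js
  induction js with
  | nil => intro cs; rfl
  | cons j js ih =>
    intro cs
    rw [List.foldl_cons, ih]
    simp [kmsColStep]

theorem kmsCol_getElem (tl pl : List Char) :
    ∀ (js : List Int) (cs : List Int) (i : Nat) (hi : i < cs.length),
      (js.foldl (fun cs j => kmsColStep tl j (PySem.List.pyGetD pl j ' ') cs) cs)[i]'(by
          rw [kmsCol_length]; exact hi)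
        = cs[i] + ((js.filter (fun j =>
            decide (PySem.List.pyGet? tl ((i : Int) + j) ≠ some (PySem.List.pyGetD pl j ' ')))).length : Int) := by
  intro js
  induction js with
  | nil => intro cs i hi; simp
  | cons j js ih =>
    intro cs i hi
    simp only [List.foldl_cons, List.filter_cons]
    have hlen : i < (kmsColStep tl j (PySem.List.pyGetD pl j ' ') cs).length := by
      simpa [kmsColStep] using hi
    rw [ih (kmsColStep tl j (PySem.List.pyGetD pl j ' ') cs) i hlen]
    by_cases h : PySem.List.pyGet? tl ((i : Int) + j) ≠ some (PySem.List.pyGetD pl j ' ')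
    · rw [if_pos (by simpa using h)]
      simp only [kmsColStep, List.getElem_mapIdx, if_pos h, List.length_cons]
      push_cast; ring
    · rw [if_neg (by simpa using h)]
      simp only [kmsColStep, List.getElem_mapIdx, if_neg h]

-- the counts list: its length, and entry i is window i's full mismatch count
theorem kmsCounts_length (pl tl : List Char) :
    (kmsCounts pl tl).length = (max ((tl.length : Int) - (pl.length : Int) + 1) 0).toNat := by
  unfold kmsCounts
  rw [kmsCol_length]
  exact List.length_replicate

theorem kmsCounts_getElem (pl tl : List Char) (i : Nat) (hi : i < (kmsCounts pl tl).length) :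
    (kmsCounts pl tl)[i]
      = (((PySem.List.pyRange 0 (pl.length : Int) 1).filter (fun j =>
          decide (PySem.List.pyGet? tl ((i : Int) + j) ≠ some (PySem.List.pyGetD pl j ' ')))).length : Int) := by
  have hi' : i < (List.replicate (max ((tl.length : Int) - (pl.length : Int) + 1) 0).toNat (0 : Int)).length := by
    rw [List.length_replicate]
    rw [kmsCounts_length] at hi
    exact hi
  have h := kmsCol_getElem tl pl (PySem.List.pyRange 0 (pl.length : Int) 1)
    (List.replicate (max ((tl.length : Int) - (pl.length : Int) + 1) 0).toNat 0) i hi'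
  rw [List.getElem_replicate] at h
  rw [zero_add] at h
  exact h

-- the two match lists coincide
theorem kms_matches_eq (pl tl : List Char) (k : Int) :
    ((PySem.List.pyRange 0 ((tl.length : Int) - (pl.length : Int) + 1) 1).foldl
      (fun acc i =>
        if kmsInnerA tl pl i k (PySem.List.pyRange 0 (pl.length : Int) 1) 0 ≤ k then acc ++ [i]
        else acc) [])
    = (PySem.List.pyRange 0 ((kmsCounts pl tl).length : Int) 1).filter
        (fun i => decide (PySem.List.pyGetD (kmsCounts pl tl) i 0 ≤ k)) := by
  rw [PySem.List.foldl_append_ite_eq_filter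
      (p := fun i => kmsInnerA tl pl i k (PySem.List.pyRange 0 (pl.length : Int) 1) 0 ≤ k)]
  rw [List.nil_append]
  have hrange : PySem.List.pyRange 0 ((tl.length : Int) - (pl.length : Int) + 1) 1
      = PySem.List.pyRange 0 ((kmsCounts pl tl).length : Int) 1 := by
    rw [kmsCounts_length]
    by_cases hle : (tl.length : Int) - (pl.length : Int) + 1 ≤ 0
    · rw [PySem.List.pyRange_one_eq_nil hle, PySem.List.pyRange_one_eq_nil (by omega)]
    · congr 1; omega
  rw [hrange]
  apply List.filter_congr
  intro i hi
  rw [PySem.List.mem_pyRange_one] at hi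
  have hilt : i.toNat < (kmsCounts pl tl).length := by omega
  have hik : i = ((i.toNat : Nat) : Int) := by omega
  have hget : PySem.List.pyGetD (kmsCounts pl tl) i 0 = (kmsCounts pl tl)[i.toNat]'hilt := by
    conv_lhs => rw [hik]
    rw [PySem.List.pyGetD_natCast]
    simp [List.getD_eq_getElem?_getD, List.getElem?_eq_getElem hilt]
  have hfilters :
      (PySem.List.pyRange 0 (pl.length : Int) 1).filter (fun j =>
          decide (PySem.List.pyGet? tl ((i.toNat : Int) + j) ≠ some (PySem.List.pyGetD pl j ' ')))
      = (PySem.List.pyRange 0 (pl.length : Int) 1).filter (fun j =>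
          decide (PySem.List.pyGet? tl (i + j) ≠ PySem.List.pyGet? pl j)) := by
    apply List.filter_congr
    intro j hj
    rw [PySem.List.mem_pyRange_one] at hj
    have hjlt : j.toNat < pl.length := by omega
    have hj' : j = ((j.toNat : Nat) : Int) := by omega
    have h1 : PySem.List.pyGet? pl j = some (pl[j.toNat]'hjlt) := by
      conv_lhs => rw [hj']
      rw [PySem.List.pyGet?_natCast, List.getElem?_eq_getElem hjlt]
    have h2 : PySem.List.pyGetD pl j ' ' = pl[j.toNat]'hjlt := by
      conv_lhs => rw [hj']
      rw [PySem.List.pyGetD_natCast]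
      simp [List.getD_eq_getElem?_getD, List.getElem?_eq_getElem hjlt]
    rw [h1, h2, ← hik]
  apply decide_eq_decide.mpr
  rw [kmsInnerA_le_iff, hget, kmsCounts_getElem pl tl i.toNat hilt, hfilters, zero_add]

-- ===== VERDICT (by name: the statement is the Claim_ definition above) =====
theorem k_mismatch_search_spec : Claim_equal_k_mismatch_search := by
  intro p t k _
  unfold Spec_k_mismatch_search k_mismatch_search k_mismatch_search_alt
  dsimp only
  rw [kms_matches_eq p.toList t.toList k]
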